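-- pv_equiv track=rewrite | github.com/VanAltrades/product-d-structur | preprocess/process_txt.py | get_structured_dict
-- ===== SOURCE A (Python) =====
-- def get_structured_dict(d, unique_keys):
--     """
--     Returns "d_schema" dictionary with common schema format from unique_keys set.
--     """
--     # now loop through the d[current_item][key] records and add them to a unique set
--
--     # Initialize the d_schema dictionary
--     d_schema = {}
--
--     # Loop through each item in d
--     for item_key, item_data in d.items():
--         d_schema[item_key] = {}  # Initialize the record in d_schema
--
--         # Loop through unique keys
--         for key in unique_keys:
--             # Add the value if the key exists in the item_data
--             if key in item_data:
--                 d_schema[item_key][key] = item_data[key]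
--             else:
--                 d_schema[item_key][key] = None  # Set None for missing keys
--     return d_schema
-- ===== SOURCE B (Python) =====
-- def get_structured_dict(d, unique_keys):
--     """
--     Returns "d_schema" dictionary with common schema format from unique_keys set.
--     Built by overlaying each item's present values onto a shared None-scaffold.
--     """
--     base = dict.fromkeys(unique_keys, None)
--     return {
--         item_key: {**base, **{k: v for k, v in item_data.items() if k in unique_keys}}
--         for item_key, item_data in d.items()
--     }
-- ===== Notes on version B (the rewrite author's own statement) =====
-- stated objective: faster
-- what changed: Instead of a per-item loop over unique_keys with an if/else membership test per key, B builds one shared None-scaffold dict via dict.fromkeys and, per item, overlays only the item's present values restricted to unique_keys with a dict merge.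
import Mathlib
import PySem

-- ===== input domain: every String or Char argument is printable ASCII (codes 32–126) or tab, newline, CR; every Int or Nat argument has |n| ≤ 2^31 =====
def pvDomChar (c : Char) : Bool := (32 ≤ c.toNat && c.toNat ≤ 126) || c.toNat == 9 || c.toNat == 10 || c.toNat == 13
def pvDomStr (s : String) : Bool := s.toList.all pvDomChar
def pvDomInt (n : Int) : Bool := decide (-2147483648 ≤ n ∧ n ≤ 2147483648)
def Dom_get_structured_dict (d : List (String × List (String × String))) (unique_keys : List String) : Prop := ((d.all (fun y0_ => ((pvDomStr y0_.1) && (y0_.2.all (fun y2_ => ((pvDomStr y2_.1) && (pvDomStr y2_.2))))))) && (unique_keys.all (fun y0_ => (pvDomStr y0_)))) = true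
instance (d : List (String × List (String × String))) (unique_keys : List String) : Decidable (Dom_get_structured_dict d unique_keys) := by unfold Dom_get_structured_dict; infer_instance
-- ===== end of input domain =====

-- B replaces A's per-key if/else loop by a shared None-scaffold dict overlaid, per item, with the
-- item's present values (constant-factor change; return-value equivalence, no argument is mutated).

-- ===== PORT A =====
-- Literal port of A: for each item, loop over unique_keys, inserting the value when the key is
-- present in item_data (a Python dict, modelled by PySem.Dict.ofList) and None otherwise.
def get_structured_dict (d : List (String × List (String × String))) (unique_keys : List String) : List (String × List (String × Option String)) :=
  (d.foldl
    (fun d_schema item =>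
      let item_data := PySem.Dict.ofList item.2
      let record := unique_keys.foldl
        (fun m key =>
          if item_data.contains key then
            -- d_schema[item_key][key] = item_data[key]; get? returns some of that value here
            m.insert key (item_data.get? key)
          else
            m.insert key none)
        (PySem.Dict.empty : PySem.Dict String (Option String))
      d_schema.insert item.1 record.items)
    (PySem.Dict.empty : PySem.Dict String (List (String × Option String)))).items

-- ===== PORT B =====
-- Literal port of B: base = dict.fromkeys(unique_keys, None); per item overlay
-- {k: v for k, v in item_data.items() if k in unique_keys} onto base.
def get_structured_dict_alt (d : List (String × List (String × String))) (unique_keys : List String) : List (String × List (String × Option String)) :=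
  let base : PySem.Dict String (Option String) :=
    PySem.Dict.ofList (unique_keys.map (fun k => (k, (none : Option String))))
  (d.foldl
    (fun acc item =>
      let present := (PySem.Dict.ofList item.2).items.filter (fun kv => unique_keys.contains kv.1)
      let merged := present.foldl (fun m kv => m.insert kv.1 (some kv.2)) base
      acc.insert item.1 merged.items)
    (PySem.Dict.empty : PySem.Dict String (List (String × Option String)))).items

-- ===== PRECONDITION & SPEC =====
def Spec_get_structured_dict (d : List (String × List (String × String))) (unique_keys : List String) (out : List (String × List (String × Option String))) : Prop := out = get_structured_dict_alt d unique_keys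
instance (d : List (String × List (String × String))) (unique_keys : List String) (out : List (String × List (String × Option String))) : Decidable (Spec_get_structured_dict d unique_keys out) := by unfold Spec_get_structured_dict; infer_instance

-- ===== CLAIM (what is proved, stated in full; the proofs are below) =====
def Claim_equal_get_structured_dict : Prop := ∀ (d : List (String × List (String × String))) (unique_keys : List String), Dom_get_structured_dict d unique_keys → Spec_get_structured_dict d unique_keys (get_structured_dict d unique_keys)

-- ===== LEMMAS AND PROOFS =====

-- A's inner loop: successively inserting (key, f key) over uk, starting from a dict whose items
-- are s.map (k, f k), yields items (Set.update s uk).map (k, f k).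
theorem foldl_insert_f_items (f : String → Option String) (uk : List String) :
    ∀ (s : List String),
      ((uk.foldl (fun m key => m.insert key (f key))
          (PySem.Dict.mk (s.map (fun k => (k, f k))))).items)
        = (PySem.Set.update s uk).map (fun k => (k, f k)) := by
  induction uk with
  | nil => intro s; simp [PySem.Set.update]
  | cons key uk ih =>
    intro s
    simp only [List.foldl_cons]
    by_cases hc : (PySem.Dict.mk (s.map (fun k => (k, f k)))).contains key = true
    · have hitems := PySem.Dict.items_insert_of_contains
        (PySem.Dict.mk (s.map (fun k => (k, f k)))) (k := key) (f key) hc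
      have hks : key ∈ s := by
        simp only [PySem.Dict.contains_mk, List.any_map, List.any_eq_true, Function.comp,
          beq_iff_eq] at hc
        obtain ⟨x, hx, rfl⟩ := hc
        exact hx
      have hdict : ((PySem.Dict.mk (s.map (fun k => (k, f k)))).insert key (f key))
          = PySem.Dict.mk (s.map (fun k => (k, f k))) := by
        apply PySem.Dict.ext
        rw [hitems]
        simp only [List.map_map]
        apply List.map_congr_left
        intro a _
        by_cases hak : a = key
        · simp [hak]
        · simp [Function.comp, hak]
      have hadd : PySem.Set.add s key = s := by
        simp [PySem.Set.add, PySem.Set.contains, hks]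
      rw [hdict, ih s]
      simp [PySem.Set.update, hadd]
    · have hitems := PySem.Dict.items_insert_of_not_contains
        (PySem.Dict.mk (s.map (fun k => (k, f k)))) (k := key) (f key) (by simp only [Bool.not_eq_true] at hc; exact hc)
      have hks : key ∉ s := by
        intro h
        apply hc
        simp only [PySem.Dict.contains_mk, List.any_map, List.any_eq_true, Function.comp,
          beq_iff_eq]
        exact ⟨key, h, rfl⟩
      have hdict : ((PySem.Dict.mk (s.map (fun k => (k, f k)))).insert key (f key))
          = PySem.Dict.mk ((s ++ [key]).map (fun k => (k, f k))) := by
        apply PySem.Dict.ext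
        rw [hitems]
        simp
      have hadd : PySem.Set.add s key = s ++ [key] := by
        simp [PySem.Set.add, PySem.Set.contains, hks]
      rw [hdict, ih (s ++ [key])]
      simp [PySem.Set.update, hadd]

-- B's overlay loop: inserting (k, some v) for pairs with distinct keys all lying in s overwrites
-- in place; the result at k is the unique value found in l, else the old f k.
theorem foldl_overlay_items (s : List String) :
    ∀ (l : List (String × String)) (f : String → Option String),
      (l.map (·.1)).Nodup → (∀ kv ∈ l, kv.1 ∈ s) →
      ((l.foldl (fun m kv => m.insert kv.1 (some kv.2))
          (PySem.Dict.mk (s.map (fun k => (k, f k))))).items)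
        = s.map (fun k => (k, match l.find? (fun kv => kv.1 == k) with
                              | some kv => some kv.2
                              | none => f k)) := by
  intro l
  induction l with
  | nil => intro f _ _; simp
  | cons kv l ih =>
    intro f hnd hmem
    have hks : kv.1 ∈ s := hmem kv (by simp)
    have hc : (PySem.Dict.mk (s.map (fun k => (k, f k)))).contains kv.1 = true := by
      simp only [PySem.Dict.contains_mk, List.any_map, List.any_eq_true, Function.comp,
        beq_iff_eq]
      exact ⟨kv.1, hks, rfl⟩
    have hdict : ((PySem.Dict.mk (s.map (fun k => (k, f k)))).insert kv.1 (some kv.2))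
        = PySem.Dict.mk (s.map (fun k => (k, if k = kv.1 then some kv.2 else f k))) := by
      apply PySem.Dict.ext
      rw [PySem.Dict.items_insert_of_contains _ _ hc]
      simp only [List.map_map]
      apply List.map_congr_left
      intro a _
      by_cases hak : a = kv.1
      · simp [hak]
      · simp [Function.comp, hak]
    rw [List.map_cons] at hnd
    have h0 := List.nodup_cons.mp hnd
    have hnd' : (l.map (·.1)).Nodup := h0.2
    have hnotin : kv.1 ∉ l.map (·.1) := h0.1
    simp only [List.foldl_cons, hdict]
    rw [ih (fun k => if k = kv.1 then some kv.2 else f k) hnd'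
        (fun p hp => hmem p (by simp [hp]))]
    apply List.map_congr_left
    intro a _
    by_cases hak : a = kv.1
    · subst hak
      have hfind : l.find? (fun p => p.1 == kv.1) = none := by
        rw [List.find?_eq_none]
        intro x hx h
        have hx1 : x.1 = kv.1 := by rwa [beq_iff_eq] at h
        exact hnotin (hx1 ▸ List.mem_map_of_mem (f := (·.1)) hx)
      simp [hfind]
    · have hne : (kv.1 == a) = false := by simp [Ne.symm hak]
      rw [List.find?_cons, hne]
      cases hf : l.find? (fun p => p.1 == a) with
      | some p => simp
      | none => simp [hak]

-- first-match lookup in a list with distinct keys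
theorem find?_of_mem_nodup {v : String} :
    ∀ (l : List (String × String)) (k : String), (l.map (·.1)).Nodup → (k, v) ∈ l →
      l.find? (fun kv => kv.1 == k) = some (k, v) := by
  intro l
  induction l with
  | nil => intro k _ h; cases h
  | cons p l ih =>
    intro k hnd hmem
    rw [List.map_cons] at hnd
    have h0 := List.nodup_cons.mp hnd
    by_cases hpk : p.1 = k
    · have hp : p = (k, v) := by
        rcases List.mem_cons.mp hmem with h | h
        · exact h.symm
        · exfalso
          have hkm : k ∈ l.map (·.1) := List.mem_map_of_mem (f := (·.1)) h
          exact h0.1 (hpk ▸ hkm)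
      have hhd : (p.1 == k) = true := by simp [hpk]
      simp [hp]
    · have hmem' : (k, v) ∈ l := by
        rcases List.mem_cons.mp hmem with h | h
        · exact absurd (congrArg Prod.fst h.symm) hpk
        · exact h
      have hne : (p.1 == k) = false := by simp [hpk]
      rw [List.find?_cons, hne]
      exact ih k h0.2 hmem'

-- the two inner dicts have identical items lists, for every item_data
theorem inner_eq (unique_keys : List String) (idata : List (String × String)) :
    (unique_keys.foldl
        (fun m key =>
          if (PySem.Dict.ofList idata).contains key then
            m.insert key ((PySem.Dict.ofList idata).get? key)
          else
            m.insert key none)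
        (PySem.Dict.empty : PySem.Dict String (Option String))).items
      = (((PySem.Dict.ofList idata).items.filter (fun kv => unique_keys.contains kv.1)).foldl
          (fun m kv => m.insert kv.1 (some kv.2))
          (PySem.Dict.ofList (unique_keys.map (fun k => (k, (none : Option String)))))).items := by
  set idict := PySem.Dict.ofList idata with hidict
  -- A's side: the branch always inserts (key, idict.get? key)
  have hA : (unique_keys.foldl
        (fun m key => if idict.contains key then m.insert key (idict.get? key) else m.insert key none)
        (PySem.Dict.empty : PySem.Dict String (Option String)))
      = unique_keys.foldl (fun m key => m.insert key (idict.get? key))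
        (PySem.Dict.empty : PySem.Dict String (Option String)) := by
    apply PySem.List.foldl_congr_mem
    intro m key _
    by_cases hc : idict.contains key = true
    · simp [hc]
    · have : idict.get? key = none := (PySem.Dict.get?_eq_none_iff_contains idict key).mpr (by simpa using hc)
      simp [hc, this]
  -- B's base dict is the scaffold over Set.ofList unique_keys
  have hbase : PySem.Dict.ofList (unique_keys.map (fun k => (k, (none : Option String))))
      = PySem.Dict.mk ((PySem.Set.ofList unique_keys).map (fun k => (k, (none : Option String)))) := by
    apply PySem.Dict.ext
    show (PySem.Dict.update PySem.Dict.empty _).items = _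
    rw [PySem.Dict.update, List.foldl_map]
    have := foldl_insert_f_items (fun _ => (none : Option String)) unique_keys []
    simpa [PySem.Set.ofList, PySem.Set.update, PySem.Set.empty] using this
  have hempty : (PySem.Dict.empty : PySem.Dict String (Option String))
      = PySem.Dict.mk (([] : List String).map (fun k => (k, idict.get? k))) := rfl
  rw [hA, hempty, foldl_insert_f_items (fun k => idict.get? k) unique_keys []]
  have hndi : ((idict.items.filter (fun kv => unique_keys.contains kv.1)).map (·.1)).Nodup := by
    have : idict.keys.Nodup := PySem.Dict.nodup_keys_ofList idata
    simp only [PySem.Dict.keys] at this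
    exact List.Nodup.sublist (List.Sublist.map _ List.filter_sublist) this
  have hmemi : ∀ kv ∈ idict.items.filter (fun kv => unique_keys.contains kv.1),
      kv.1 ∈ PySem.Set.ofList unique_keys := by
    intro kv hkv
    have := (List.mem_filter.mp hkv).2
    have : kv.1 ∈ unique_keys := by simpa using this
    simpa [PySem.Set.mem_ofList] using this
  rw [hbase, foldl_overlay_items (PySem.Set.ofList unique_keys) _ _ hndi hmemi]
  have hset : PySem.Set.ofList unique_keys = PySem.Set.update ([] : List String) unique_keys := rfl
  rw [← hset]
  apply List.map_congr_left
  intro k hk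
  have hkuk : k ∈ unique_keys := by
    simpa [PySem.Set.mem_ofList] using hk
  cases hget : idict.get? k with
  | some v =>
    have hmem : (k, v) ∈ idict.items := PySem.Dict.mem_items_of_get?_eq_some idict hget
    have hmemf : (k, v) ∈ idict.items.filter (fun kv => unique_keys.contains kv.1) := by
      rw [List.mem_filter]
      exact ⟨hmem, by simpa using hkuk⟩
    rw [find?_of_mem_nodup _ k hndi hmemf]
  | none =>
    have hnk : k ∉ idict.keys := (PySem.Dict.get?_eq_none_iff_not_mem_keys idict k).mp hget
    have hfind : (idict.items.filter (fun kv => unique_keys.contains kv.1)).find?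
        (fun kv => kv.1 == k) = none := by
      rw [List.find?_eq_none]
      intro x hx
      simp only [beq_iff_eq]
      intro hxk
      apply hnk
      simp only [PySem.Dict.keys]
      exact hxk ▸ List.mem_map_of_mem (f := (·.1)) (List.mem_filter.mp hx).1
    rw [hfind]

-- ===== VERDICT (by name: the statement is the Claim_ definition above) =====
theorem get_structured_dict_spec : Claim_equal_get_structured_dict := by
  intro d unique_keys _
  unfold Spec_get_structured_dict get_structured_dict get_structured_dict_alt
  congr 1
  apply PySem.List.foldl_congr_mem
  intro acc item _
  simp only
  congr 1
  exact inner_eq unique_keys item.2
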